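-- pv_equiv track=rewrite | github.com/MyMiDiII/bmstu-python | sem_01/lab_11/lab_11.py | len_of_rows_and_spaces
-- ===== SOURCE A (Python) =====
-- def len_of_rows_and_spaces(t):
--     kolst = 1
--     for x in t:
--         if x == '\n':
--             kolst += 1
--     lens = [0]*kolst
--     num_of_spaces = [0]*kolst
--     k = 0
--     i = 0
--     num_spaces = -4
--     for x in t:
--         if x == '\n':
--             lens[k] = i
--             num_of_spaces[k] = num_spaces
--             i = 0
--             k += 1
--             num_spaces = 0
--         else:
--             i += 1
--             if x == ' ':
--                 num_spaces += 1
--     lens[k] = i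
--     num_of_spaces[k] = num_spaces
--     return lens, num_of_spaces
-- ===== SOURCE B (Python) =====
-- def len_of_rows_and_spaces(t):
--     rows = t.split('\n')
--     lens = [len(r) for r in rows]
--     spaces = [r.count(' ') for r in rows]
--     spaces[0] -= 4  # A counts the first row's spaces starting from -4 (its indent offset); keep that behaviour
--     return lens, spaces
-- ===== Notes on version B (the rewrite author's own statement) =====
-- stated objective: simpler
-- what changed: Replaces A's newline-counting pass plus index-bookkeeping char-by-char scan over preallocated arrays with one split on newlines and per-row len/count library calls (the first row's space count keeps A's -4 offset).
import Mathlib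
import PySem

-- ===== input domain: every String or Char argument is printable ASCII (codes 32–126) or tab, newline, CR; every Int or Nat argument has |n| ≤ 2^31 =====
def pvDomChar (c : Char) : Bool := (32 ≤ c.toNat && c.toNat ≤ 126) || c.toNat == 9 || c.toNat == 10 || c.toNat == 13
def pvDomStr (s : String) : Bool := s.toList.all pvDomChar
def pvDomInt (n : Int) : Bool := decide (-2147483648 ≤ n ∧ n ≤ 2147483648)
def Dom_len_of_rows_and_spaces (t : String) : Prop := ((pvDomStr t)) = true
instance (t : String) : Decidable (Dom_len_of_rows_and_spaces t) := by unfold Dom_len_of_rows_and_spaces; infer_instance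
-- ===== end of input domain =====

-- B replaces A's two char-by-char scans with a split on newlines plus per-row len/count library calls (simpler, measured faster);
-- A's first-row space count is deliberately offset by -4 (its indent convention) and B keeps that.

-- ===== PORT A =====
-- the body of A's second for-loop
def pvStepA (st : List Int × List Int × Nat × Int × Int) (x : Char) :
    List Int × List Int × Nat × Int × Int :=
  match st with
  | (lens, spaces, k, i, ns) =>
    if x = '\n' then (lens.set k i, spaces.set k ns, k + 1, 0, 0)
    else (lens, spaces, k, i + 1, if x = ' ' then ns + 1 else ns)

def len_of_rows_and_spaces (t : String) : List Int × List Int :=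
  let cs := t.toList
  let kolst : Int := cs.foldl (fun k x => if x = '\n' then k + 1 else k) 1
  let st := cs.foldl pvStepA
      (List.replicate kolst.toNat 0, List.replicate kolst.toNat 0, 0, 0, -4)
  match st with
  | (lens, spaces, k, i, ns) => (lens.set k i, spaces.set k ns)

-- ===== PORT B =====
def len_of_rows_and_spaces_alt (t : String) : List Int × List Int :=
  -- rows = t.split('\n')  (separator nonempty, never raises)
  let rows : List String := (PySem.Chars.splitOn t.toList ['\n']).map String.ofList
  let lens : List Int := rows.map (fun r => PySem.Str.len r)
  let spaces : List Int := rows.map (fun r => (PySem.Str.count r " " : Int))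
  (lens, spaces.modify 0 (· - 4))  -- spaces[0] -= 4

-- ===== PRECONDITION & SPEC =====
def Spec_len_of_rows_and_spaces (t : String) (out : List Int × List Int) : Prop := out = len_of_rows_and_spaces_alt t
instance (t : String) (out : List Int × List Int) : Decidable (Spec_len_of_rows_and_spaces t out) := by unfold Spec_len_of_rows_and_spaces; infer_instance

-- ===== CLAIM (what is proved, stated in full; the proofs are below) =====
def Claim_equal_len_of_rows_and_spaces : Prop := ∀ (t : String), Dom_len_of_rows_and_spaces t → Spec_len_of_rows_and_spaces t (len_of_rows_and_spaces t)

-- ===== LEMMAS AND PROOFS =====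

-- clean structural model of splitting on '\n'
def pvRows : List Char → List (List Char)
  | [] => [[]]
  | c :: cs => if c = '\n' then [] :: pvRows cs else (pvRows cs).modifyHead (c :: ·)

theorem pvRows_ne_nil (cs : List Char) : pvRows cs ≠ [] := by
  induction cs with
  | nil => simp [pvRows]
  | cons c cs ih =>
    simp only [pvRows]
    split_ifs
    · simp
    · cases h : pvRows cs with
      | nil => exact absurd h ih
      | cons r rs => simp [List.modifyHead]

theorem pvRows_shape (cs : List Char) : pvRows cs = (pvRows cs).headI :: (pvRows cs).tail := by
  obtain ⟨r, rs, h⟩ := List.exists_cons_of_ne_nil (pvRows_ne_nil cs)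
  simp [h]

theorem pvSplitGo_eq (cs : List Char) : ∀ (fuel : Nat) (cur : List Char) (acc : List (List Char)),
    cs.length < fuel →
    PySem.Chars.splitOn.go ['\n'] fuel cs cur acc
      = acc.reverse ++ (cur.reverse ++ (pvRows cs).headI) :: (pvRows cs).tail := by
  induction cs with
  | nil =>
    intro fuel cur acc h
    cases fuel with
    | zero => omega
    | succ f => simp [PySem.Chars.splitOn.go, pvRows]
  | cons c cs ih =>
    intro fuel cur acc h
    cases fuel with
    | zero => omega
    | succ f =>
      by_cases hc : c = '\n'
      · subst hc
        rw [PySem.Chars.splitOn.go]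
        simp only [List.isPrefixOf, BEq.rfl, Bool.true_and, if_true, List.length_cons,
          List.length_nil, List.drop_succ_cons, List.drop_zero]
        rw [ih f [] (List.reverse cur :: acc) (by simpa using Nat.lt_of_succ_lt_succ h)]
        rw [pvRows_shape cs]
        simp [pvRows]
        rw [← pvRows_shape]
      · rw [PySem.Chars.splitOn.go]
        have hpre : List.isPrefixOf ['\n'] (c :: cs) = false := by
          simp [List.isPrefixOf]
          intro hcn; exact absurd hcn.symm hc
        simp only [hpre, Bool.false_eq_true, if_false]
        rw [ih f (c :: cur) acc (by simpa using Nat.lt_of_succ_lt_succ h)]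
        rw [pvRows_shape cs]
        simp [pvRows, hc, List.modifyHead]
        rw [pvRows_shape cs]
        simp

theorem pvSplitOn_eq (cs : List Char) : PySem.Chars.splitOn cs ['\n'] = pvRows cs := by
  rw [PySem.Chars.splitOn]
  rw [pvSplitGo_eq cs (cs.length + 1) [] [] (by omega)]
  simpa using (pvRows_shape cs).symm

theorem pvCountGo_eq (cs : List Char) : ∀ (fuel : Nat) (acc : Nat),
    cs.length ≤ fuel →
    PySem.Chars.count.go [' '] fuel cs acc = acc + cs.count ' ' := by
  induction cs with
  | nil => intro fuel acc h; cases fuel <;> simp [PySem.Chars.count.go]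
  | cons c cs ih =>
    intro fuel acc h
    cases fuel with
    | zero => simp at h
    | succ f =>
      rw [PySem.Chars.count.go]
      by_cases hc : c = ' '
      · subst hc
        simp only [List.isPrefixOf, BEq.rfl, Bool.true_and, if_true, List.length_cons,
          List.length_nil, List.drop_succ_cons, List.drop_zero]
        rw [ih f (acc + 1) (by simpa using Nat.le_of_succ_le_succ h)]
        simp [List.count_cons]
        omega
      · have hpre : List.isPrefixOf [' '] (c :: cs) = false := by
          simp [List.isPrefixOf]
          intro hcn; exact absurd hcn.symm hc
        simp only [hpre, Bool.false_eq_true, if_false]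
        rw [ih f acc (by simpa using Nat.le_of_succ_le_succ h)]
        simp [List.count_cons, hc]

theorem pvCount_eq (cs : List Char) : PySem.Chars.count cs [' '] = cs.count ' ' := by
  rw [PySem.Chars.count]
  simpa using pvCountGo_eq cs cs.length 0 (le_refl _)

theorem pvSet_append {L rest : List Int} (v z : Int) :
    (L ++ z :: rest).set L.length v = L ++ v :: rest := by
  simp [List.set_append]

-- the two writes after A's second loop
def pvFinishA (st : List Int × List Int × Nat × Int × Int) : List Int × List Int :=
  (st.1.set st.2.2.1 st.2.2.2.1, st.2.1.set st.2.2.1 st.2.2.2.2)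

-- the loop invariant of A's second pass, finished by the two trailing writes
theorem pvFoldA (cs : List Char) : ∀ (L S : List Int) (i ns : Int), S.length = L.length →
    pvFinishA
      (cs.foldl pvStepA
        (L ++ List.replicate (cs.count '\n' + 1) 0,
         S ++ List.replicate (cs.count '\n' + 1) 0, L.length, i, ns))
    = (L ++ (i + ((pvRows cs).headI.length : Int)) ::
            (pvRows cs).tail.map (fun r => (r.length : Int)),
       S ++ (ns + ((pvRows cs).headI.count ' ' : Int)) ::
            (pvRows cs).tail.map (fun r => (r.count ' ' : Int))) := by
  induction cs with
  | nil =>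
    intro L S i ns hlen
    simp only [List.foldl_nil, List.count_nil, List.replicate, pvRows, pvFinishA]
    simp [pvSet_append, ← hlen]
  | cons c cs ih =>
    intro L S i ns hlen
    by_cases hc : c = '\n'
    · subst hc
      have hcnt : List.count '\n' ('\n' :: cs) = List.count '\n' cs + 1 := by
        simp [List.count_cons]
      rw [hcnt]
      simp only [List.foldl_cons]
      have hrep : List.replicate (List.count '\n' cs + 1 + 1) (0 : Int)
          = (0 : Int) :: List.replicate (List.count '\n' cs + 1) 0 := rfl
      rw [hrep]
      have hstep : pvStepA
          (L ++ (0 : Int) :: List.replicate (List.count '\n' cs + 1) 0,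
           S ++ (0 : Int) :: List.replicate (List.count '\n' cs + 1) 0, L.length, i, ns) '\n'
          = ((L ++ [i]) ++ List.replicate (List.count '\n' cs + 1) 0,
             (S ++ [ns]) ++ List.replicate (List.count '\n' cs + 1) 0, (L ++ [i]).length, 0, 0) := by
        simp [pvStepA, pvSet_append, ← hlen]
      rw [hstep]
      rw [ih (L ++ [i]) (S ++ [ns]) 0 0 (by simp [hlen])]
      obtain ⟨r, rs, hr⟩ := List.exists_cons_of_ne_nil (pvRows_ne_nil cs)
      simp [pvRows, hr]
    · simp only [List.foldl_cons]
      have hcnt : List.count '\n' (c :: cs) = List.count '\n' cs := by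
        simp [List.count_cons, hc]
      rw [hcnt]
      have hstep : pvStepA
          (L ++ List.replicate (List.count '\n' cs + 1) (0 : Int),
           S ++ List.replicate (List.count '\n' cs + 1) (0 : Int), L.length, i, ns) c
          = (L ++ List.replicate (List.count '\n' cs + 1) 0,
             S ++ List.replicate (List.count '\n' cs + 1) 0, L.length, i + 1,
             if c = ' ' then ns + 1 else ns) := by
        simp [pvStepA, hc]
      rw [hstep]
      rw [ih L S (i + 1) (if c = ' ' then ns + 1 else ns) hlen]
      obtain ⟨r, rs, hr⟩ := List.exists_cons_of_ne_nil (pvRows_ne_nil cs)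
      by_cases hsp : c = ' ' <;>
        simp [pvRows, hc, hr, hsp, List.count_cons, Prod.mk.injEq] <;>
        push_cast <;> omega

-- ===== VERDICT (by name: the statement is the Claim_ definition above) =====
theorem len_of_rows_and_spaces_spec : Claim_equal_len_of_rows_and_spaces := by
  intro t _
  unfold Spec_len_of_rows_and_spaces len_of_rows_and_spaces len_of_rows_and_spaces_alt
  set cs := t.toList with hcs
  have hkol : (cs.foldl (fun k x => if x = '\n' then k + 1 else k) (1 : Int)).toNat
      = cs.count '\n' + 1 := by
    rw [PySem.List.foldl_ite_add_one (fun x => x = '\n') cs 1]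
    have : List.countP (fun x => decide (x = '\n')) cs = cs.count '\n' := by
      refine List.countP_congr ?_
      intro x _; by_cases hx : x = '\n' <;> simp [hx]
    rw [this]; omega
  simp only [hkol]
  have hfold := pvFoldA cs [] [] 0 (-4) rfl
  simp only [pvFinishA, List.nil_append, List.length_nil] at hfold
  rw [hfold]
  rw [pvSplitOn_eq]
  obtain ⟨r, rs, hr⟩ := List.exists_cons_of_ne_nil (pvRows_ne_nil cs)
  simp [hr, PySem.Str.len_eq, PySem.Str.count_eq, pvCount_eq, List.modify,
    neg_add_eq_sub]
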